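-- pv_equiv track=rewrite | github.com/open-thought/reasoning-gym | reasoning_gym/combinatorics/combinatorics.py | _subfactorial
-- ===== SOURCE A (Python) =====
-- def _subfactorial(n: int) -> int:
--     if n == 0:
--         return 1
--     if n == 1:
--         return 0
--     d_prev2, d_prev1 = 1, 0
--     for i in range(2, n + 1):
--         d_curr = (i - 1) * (d_prev1 + d_prev2)
--         d_prev2, d_prev1 = d_prev1, d_curr
--     return d_prev1
-- ===== SOURCE B (Python) =====
-- def _subfactorial(n: int) -> int:
--     if n < 2:
--         return 1 if n == 0 else 0
--     d = 0  # D(1)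
--     for i in range(2, n + 1):
--         d = i * d + (1 if i % 2 == 0 else -1)
--     return d
-- ===== Notes on version B (the rewrite author's own statement) =====
-- stated objective: simpler
-- what changed: Replaces the two-term recurrence D(i)=(i-1)(D(i-1)+D(i-2)) with pair state by the one-term recurrence D(i)=i*D(i-1) plus an alternating sign, maintaining a single running value.
import Mathlib
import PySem

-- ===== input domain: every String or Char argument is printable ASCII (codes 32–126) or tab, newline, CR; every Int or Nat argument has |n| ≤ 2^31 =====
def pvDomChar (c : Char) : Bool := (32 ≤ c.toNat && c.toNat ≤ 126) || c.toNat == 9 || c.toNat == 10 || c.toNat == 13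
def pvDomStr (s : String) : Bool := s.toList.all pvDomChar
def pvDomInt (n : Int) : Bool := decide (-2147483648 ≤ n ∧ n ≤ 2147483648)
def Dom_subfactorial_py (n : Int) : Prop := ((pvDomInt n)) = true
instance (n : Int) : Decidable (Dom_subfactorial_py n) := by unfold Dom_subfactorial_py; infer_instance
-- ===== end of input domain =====

-- B replaces A's two-term recurrence (pair state) by the one-term recurrence D(i)=i*D(i-1) plus an alternating sign, with a single running value; same cost, simpler state.


-- ===== PORT A =====
def subfactorial_py (n : Int) : Int :=
  if n == 0 then 1
  else if n == 1 then 0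
  else
    ((PySem.List.pyRange 2 (n + 1) 1).foldl
      (fun (p : Int × Int) i => (p.2, (i - 1) * (p.2 + p.1))) (1, 0)).2

-- ===== PORT B =====
def subfactorial_py_alt (n : Int) : Int :=
  if n < 2 then (if n == 0 then 1 else 0)
  else
    (PySem.List.pyRange 2 (n + 1) 1).foldl
      (fun d i => i * d + (if PySem.Int.mod i 2 == 0 then 1 else -1)) 0

-- ===== PRECONDITION & SPEC =====
def Spec_subfactorial_py (n : Int) (out : Int) : Prop := out = subfactorial_py_alt n
instance (n : Int) (out : Int) : Decidable (Spec_subfactorial_py n out) := by unfold Spec_subfactorial_py; infer_instance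

-- ===== CLAIM (what is proved, stated in full; the proofs are below) =====
def Claim_equal_subfactorial_py : Prop := ∀ (n : Int), Dom_subfactorial_py n → Spec_subfactorial_py n (subfactorial_py n)

-- ===== LEMMAS AND PROOFS =====

-- the derangement numbers (reference sequence for both folds)
def gsub : Nat → Int
  | 0 => 1
  | 1 => 0
  | (k + 2) => (k + 1) * (gsub (k + 1) + gsub k)

def sgn (k : Nat) : Int := if k % 2 = 0 then 1 else -1

lemma sgn_succ (k : Nat) : sgn (k + 1) = - sgn k := by
  simp [sgn, Nat.add_mod]
  rcases Nat.mod_two_eq_zero_or_one k with h | h <;> simp [h]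

lemma g_rec (k : Nat) : gsub (k + 2) = (k + 2) * gsub (k + 1) + sgn k := by
  induction k with
  | zero => simp [gsub, sgn]
  | succ k ih =>
      have : gsub (k + 3) = (k + 2) * (gsub (k + 2) + gsub (k + 1)) := by
        rw [show k + 3 = (k + 1) + 2 from rfl, gsub]; push_cast; ring
      rw [this, sgn_succ]
      have := ih
      push_cast
      push_cast at this
      linarith [this]

lemma peel (k : Nat) :
    PySem.List.pyRange 2 ((2 + (k + 1 : Nat)) + 1) 1
      = PySem.List.pyRange 2 ((2 + (k : Nat)) + 1) 1 ++ [(2 + (k : Nat) + 1 : Int)] := by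
  have := PySem.List.pyRange_one_succ_right (a := 2) (b := (2 + (k : Nat) + 1 : Int)) (by omega)
  simpa [add_assoc] using this

lemma fa_eq (k : Nat) :
    (PySem.List.pyRange 2 ((2 + (k : Nat)) + 1) 1).foldl
      (fun (p : Int × Int) i => (p.2, (i - 1) * (p.2 + p.1))) (1, 0)
    = (gsub (k + 1), gsub (k + 2)) := by
  induction k with
  | zero =>
      have : PySem.List.pyRange 2 3 1 = [(2 : Int)] := by decide
      norm_num [this, List.foldl, gsub]
  | succ k ih =>
      rw [peel, List.foldl_append, ih]
      simp only [List.foldl]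
      have hg3 : gsub (k + 3) = (k + 2) * (gsub (k + 2) + gsub (k + 1)) := by
        rw [show k + 3 = (k + 1) + 2 from rfl, gsub]; push_cast; ring
      rw [Prod.mk.injEq]
      refine ⟨rfl, ?_⟩
      show ((2 + (k : Nat) + 1 : Int) - 1) * (gsub (k + 2) + gsub (k + 1)) = gsub (k + 1 + 2)
      rw [show k + 1 + 2 = k + 3 from rfl, hg3]; push_cast; ring

lemma fb_eq (k : Nat) :
    (PySem.List.pyRange 2 ((2 + (k : Nat)) + 1) 1).foldl
      (fun d i => i * d + (if PySem.Int.mod i 2 == 0 then 1 else -1)) 0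
    = gsub (k + 2) := by
  induction k with
  | zero =>
      have : PySem.List.pyRange 2 3 1 = [(2 : Int)] := by decide
      norm_num [this, List.foldl, gsub, PySem.Int.mod]
  | succ k ih =>
      rw [peel, List.foldl_append, ih]
      simp only [List.foldl]
      have hg := g_rec (k + 1)
      have hsgn : (if PySem.Int.mod (2 + (k : Nat) + 1) 2 == 0 then (1 : Int) else -1) = sgn (k + 1) := by
        have hdvd := PySem.Int.mod_eq_zero_iff_dvd (2 + (k : Nat) + 1 : Int) 2
        simp only [sgn, beq_iff_eq]
        rcases Nat.mod_two_eq_zero_or_one (k + 1) with h | h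
        · have hd : (2 : Int) ∣ (2 + (k : Nat) + 1) := by omega
          have hm : PySem.Int.mod (2 + (k : Nat) + 1 : Int) 2 = 0 := hdvd.mpr hd
          simp [hm, h]
          exact hd
        · have hd : ¬ (2 : Int) ∣ (2 + (k : Nat) + 1) := by omega
          have hm : PySem.Int.mod (2 + (k : Nat) + 1 : Int) 2 ≠ 0 := fun e => hd (hdvd.mp e)
          simp [hm, h]
          omega
      rw [hsgn, hg]
      push_cast
      ring

-- ===== VERDICT (by name: the statement is the Claim_ definition above) =====
theorem subfactorial_py_spec : Claim_equal_subfactorial_py := by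
  intro n _
  show subfactorial_py n = subfactorial_py_alt n
  unfold subfactorial_py subfactorial_py_alt
  by_cases h0 : n = 0
  · simp [h0]
  by_cases h1 : n = 1
  · simp [h1]
  by_cases h2 : 2 ≤ n
  · -- n ≥ 2: both folds compute gsub
    obtain ⟨k, hk⟩ : ∃ k : Nat, n = 2 + (k : Nat) := ⟨(n - 2).toNat, by omega⟩
    subst hk
    have hfa := fa_eq k
    have hfb := fb_eq k
    simp only [hfa, hfb]
    have hlt : ¬ ((2 : Int) + (k : Nat) < 2) := by push_cast; omega
    simp [hlt, h0, h1]
  · -- n < 0: empty range, both return 0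
    have hn : n < 2 := by omega
    have hempty : PySem.List.pyRange 2 (n + 1) 1 = [] :=
      PySem.List.pyRange_one_eq_nil (by omega)
    simp [h0, h1, hn, hempty]
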